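-- pv_equiv track=rewrite | github.com/leejohy-0223/python-solve | python/t_0806/q4/Solution.py | solution
-- ===== SOURCE A (Python) =====
-- class Member:
--     def __init__(self, ids, parent, grandParent):
--         self.ids = ids
--         self.parent = parent
--         self.grandParent = grandParent
--         self.score = 0
--
--     def plusSelfScore(self, s):
--         self.score += s
--
--     def plusParentScore(self):
--         if self.parent is not None:
--             self.parent.plusSelfScore(3)
--
--     def plusGrandParentScore(self):
--         if self.grandParent is not None:
--             self.grandParent.plusSelfScore(1)
--
--     def plusScore(self):
--         self.plusSelfScore(10)
--         self.plusParentScore()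
--         self.plusGrandParentScore()
--
--     def getParent(self):
--         return self.parent
--
--     def getScore(self):
--         return self.score
--
-- def solution(invitationPairs):
--     signUpCheck = set()
--     members = dict()
--
--     for pair in invitationPairs:
--         parent, child = pair
--
--         # 부모(초대자)도 처음인 경우에는 부모를 members에 넣기
--         if parent not in signUpCheck:
--             signUpCheck.add(parent)
--             parentObject = Member(parent, None, None)
--             members.setdefault(parent, parentObject)
--
--         else:
--             parentObject = members[parent]
--
--         # 초대자 생성해서 members에 넣기
--         signUpCheck.add(child)
--         members.setdefault(child, Member(child, parentObject, parentObject.getParent()))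
--
--         # 점수 올리기
--         parentObject.plusScore()
--
--     sorted_members = sorted(members.items(), key=lambda x: (-x[1].getScore(), x[0]))
--     return [i[0] for i in sorted_members]
-- ===== SOURCE B (Python) =====
-- def solution(invitationPairs):
--     parent_of = {}   # node -> inviter id or None; first sight wins
--     cnt = {}         # node -> number of pairs where it is the inviter
--     for parent, child in invitationPairs:
--         if parent not in parent_of:
--             parent_of[parent] = None
--         parent_of.setdefault(child, parent)
--         cnt[parent] = cnt.get(parent, 0) + 1
--     score = {node: 0 for node in parent_of}
--     for p, k in cnt.items():
--         score[p] += 10 * k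
--         par = parent_of[p]
--         if par is not None:
--             score[par] += 3 * k
--             gp = parent_of[par]
--             if gp is not None:
--                 score[gp] += k
--     return sorted(score, key=lambda x: (-score[x], x))
-- ===== Notes on version B (the rewrite author's own statement) =====
-- stated objective: alternative
-- what changed: Drops the mutable Member objects and per-pair score propagation: pass 1 records first-wins parent links and per-inviter counts in plain dicts, pass 2 adds 10/3/1 times each inviter's count to the inviter, its parent and grandparent, then ids are sorted by (-score, id).
import Mathlib
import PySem

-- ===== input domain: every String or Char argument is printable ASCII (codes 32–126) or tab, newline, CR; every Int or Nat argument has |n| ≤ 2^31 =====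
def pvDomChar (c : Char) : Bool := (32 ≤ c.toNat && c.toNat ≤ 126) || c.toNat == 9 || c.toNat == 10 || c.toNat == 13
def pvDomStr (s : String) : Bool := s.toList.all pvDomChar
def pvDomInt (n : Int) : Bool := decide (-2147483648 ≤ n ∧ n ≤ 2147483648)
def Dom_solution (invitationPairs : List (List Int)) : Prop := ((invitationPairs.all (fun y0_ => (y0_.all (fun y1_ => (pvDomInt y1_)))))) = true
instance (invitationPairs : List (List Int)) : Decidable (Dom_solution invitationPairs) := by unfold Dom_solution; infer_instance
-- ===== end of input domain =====

-- B replaces A's mutable Member objects by two counting passes over plain dicts; equivalence is about the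
-- return value (A mutates nothing the caller passed in).

-- 'parent, child = pair' — both ports unpack a length-2 pair the same way (Pre_ guarantees length 2)
def pvPairP (pr : List Int) : Int := (pr[0]?).getD 0
def pvPairC (pr : List Int) : Int := (pr[1]?).getD 0

-- ===== PORT A =====
-- A Member object is modelled by its id's entry in the members dict: (parent id, grandParent id, score).
-- Object identity = id key is exact here: 'members' holds exactly one Member per id.
def stepA (st : PySem.Set Int × PySem.Dict Int (Option Int × Option Int × Int)) (pr : List Int) :
    PySem.Set Int × PySem.Dict Int (Option Int × Option Int × Int) :=
  let parent := pvPairP pr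
  let child := pvPairC pr
  let smp :=
    if PySem.Set.contains st.1 parent then
      (st.1, st.2, st.2.getD parent (none, none, 0))
    else
      let pObj : Option Int × Option Int × Int := (none, none, 0)
      (PySem.Set.add st.1 parent, st.2.setdefault parent pObj, pObj)
  let s := PySem.Set.add smp.1 child
  let pObj := smp.2.2
  let m := smp.2.1.setdefault child (some parent, pObj.1, 0)
  -- parentObject.plusScore(): +10 self, +3 parent, +1 grandParent
  let m := m.modify parent (none, none, 0) (fun t => (t.1, t.2.1, t.2.2 + 10))
  let m := match pObj.1 with
    | some pp => m.modify pp (none, none, 0) (fun t => (t.1, t.2.1, t.2.2 + 3))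
    | none => m
  let m := match pObj.2.1 with
    | some gp => m.modify gp (none, none, 0) (fun t => (t.1, t.2.1, t.2.2 + 1))
    | none => m
  (s, m)

def solution (invitationPairs : List (List Int)) : List Int :=
  let st := invitationPairs.foldl stepA (PySem.Set.empty, PySem.Dict.empty)
  (PySem.List.sorted2 st.2.items (fun x => -(x.2.2.2)) (fun x => x.1) false).map (fun x => x.1)

-- ===== PORT B =====
def stepB1 (st : PySem.Dict Int (Option Int) × PySem.Dict Int Int) (pr : List Int) :
    PySem.Dict Int (Option Int) × PySem.Dict Int Int :=
  let parent := pvPairP pr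
  let child := pvPairC pr
  let po := if st.1.contains parent then st.1 else st.1.insert parent none
  let po := po.setdefault child (some parent)
  let cnt := st.2.insert parent (st.2.getD parent 0 + 1)
  (po, cnt)

def stepB2 (po : PySem.Dict Int (Option Int)) (sc : PySem.Dict Int Int) (pk : Int × Int) :
    PySem.Dict Int Int :=
  let sc := sc.modify pk.1 0 (fun v => v + 10 * pk.2)
  match po.getD pk.1 none with
  | none => sc
  | some par =>
    let sc := sc.modify par 0 (fun v => v + 3 * pk.2)
    match po.getD par none with
    | none => sc
    | some gp => sc.modify gp 0 (fun v => v + pk.2)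

def solution_alt (invitationPairs : List (List Int)) : List Int :=
  let st := invitationPairs.foldl stepB1 (PySem.Dict.empty, PySem.Dict.empty)
  let po := st.1
  let cnt := st.2
  let sc0 := po.keys.foldl (fun d k => d.insert k (0 : Int)) PySem.Dict.empty
  let sc := cnt.items.foldl (stepB2 po) sc0
  PySem.List.sorted2 sc.keys (fun x => -(sc.getD x 0)) (fun x => x) false

-- ===== PRECONDITION & SPEC =====
-- Python A raises ValueError unpacking 'parent, child = pair' unless every pair has exactly 2 elements.
def Pre_solution (invitationPairs : List (List Int)) : Prop :=
  ∀ pr ∈ invitationPairs, pr.length = 2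
instance (invitationPairs : List (List Int)) : Decidable (Pre_solution invitationPairs) := by
  unfold Pre_solution; infer_instance

def pvWitness_solution : List (List Int) := [[1, 2], [1, 3], [2, 4]]

def Spec_solution (invitationPairs : List (List Int)) (out : List Int) : Prop := out = solution_alt invitationPairs
instance (invitationPairs : List (List Int)) (out : List Int) : Decidable (Spec_solution invitationPairs out) := by unfold Spec_solution; infer_instance

-- ===== CLAIM (what is proved, stated in full; the proofs are below) =====
def Claim_equal_solution : Prop := ∀ (invitationPairs : List (List Int)), Dom_solution invitationPairs → Pre_solution invitationPairs → Spec_solution invitationPairs (solution invitationPairs)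

-- ===== LEMMAS AND PROOFS =====


def gLink (po : PySem.Dict Int (Option Int)) (k : Int) : Option Int :=
  (po.getD k none).bind (fun q => po.getD q none)

def contrib (po : PySem.Dict Int (Option Int)) (a k : Int) : Int :=
  (if a = k then 10 else 0) + (if po.getD a none = some k then 3 else 0) +
    (if gLink po a = some k then 1 else 0)

def scoreOf (po : PySem.Dict Int (Option Int)) (P : List Int) (k : Int) : Int :=
  (P.map (fun a => contrib po a k)).sum

def InvAB (s : PySem.Set Int) (m : PySem.Dict Int (Option Int × Option Int × Int))
    (po : PySem.Dict Int (Option Int)) (P : List Int) : Prop :=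
  m.keys = po.keys ∧ s = po.keys ∧ po.keys.Nodup ∧
  (∀ a ∈ P, a ∈ po.keys) ∧
  (∀ q v, po.getD q none = some v → v ∈ po.keys) ∧
  (∀ k, m.getD k (none, none, 0) = (po.getD k none, gLink po k, scoreOf po P k))

theorem gLink_congr (po po' : PySem.Dict Int (Option Int)) (x : Int)
    (h1 : po'.getD x none = po.getD x none)
    (h2 : ∀ v, po.getD x none = some v → po'.getD v none = po.getD v none) :
    gLink po' x = gLink po x := by
  unfold gLink
  rw [h1]
  cases hv : po.getD x none with
  | none => rfl
  | some v => simp [Option.bind, h2 v hv]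

theorem contrib_congr (po po' : PySem.Dict Int (Option Int)) (x k : Int)
    (h1 : po'.getD x none = po.getD x none)
    (h2 : ∀ v, po.getD x none = some v → po'.getD v none = po.getD v none) :
    contrib po' x k = contrib po x k := by
  unfold contrib
  rw [h1, gLink_congr po po' x h1 h2]

theorem scoreOf_congr (po po' : PySem.Dict Int (Option Int)) (P : List Int) (k : Int)
    (h : ∀ x ∈ P, po'.getD x none = po.getD x none ∧
          ∀ v, po.getD x none = some v → po'.getD v none = po.getD v none) :
    scoreOf po' P k = scoreOf po P k := by
  unfold scoreOf
  exact congrArg List.sum (List.map_congr_left (fun x hx => contrib_congr po po' x k (h x hx).1 (h x hx).2))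

theorem contrib_notin (po : PySem.Dict Int (Option Int)) (a k : Int)
    (hval : ∀ q v, po.getD q none = some v → v ∈ po.keys)
    (haK : a ∈ po.keys) (hk : k ∉ po.keys) : contrib po a k = 0 := by
  have h1 : ¬ a = k := by rintro rfl; exact hk haK
  have h2 : ¬ po.getD a none = some k := fun he => hk (hval a k he)
  have h3 : ¬ gLink po a = some k := by
    unfold gLink
    cases hv : po.getD a none with
    | none => simp
    | some v => simpa [Option.bind] using fun he => hk (hval v k he)
  simp [contrib, h1, h2, h3]

theorem scoreOf_notin (po : PySem.Dict Int (Option Int)) (P : List Int) (k : Int)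
    (hP : ∀ a ∈ P, a ∈ po.keys)
    (hval : ∀ q v, po.getD q none = some v → v ∈ po.keys)
    (hk : k ∉ po.keys) : scoreOf po P k = 0 := by
  unfold scoreOf
  rw [List.map_congr_left (fun x hx => contrib_notin po x k hval (hP x hx) hk)]
  simp

theorem scoreOf_append_singleton (po : PySem.Dict Int (Option Int)) (P : List Int) (a k : Int) :
    scoreOf po (P ++ [a]) k = scoreOf po P k + contrib po a k := by
  simp [scoreOf]


def bump (n : Int) (t : Option Int × Option Int × Int) : Option Int × Option Int × Int :=
  (t.1, t.2.1, t.2.2 + n)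

def applyOpt (o : Option Int) (n : Int) (m : PySem.Dict Int (Option Int × Option Int × Int)) :
    PySem.Dict Int (Option Int × Option Int × Int) :=
  match o with
  | some x => m.modify x (none, none, 0) (bump n)
  | none => m

theorem keys_modify_mem {ν : Type} (m : PySem.Dict Int ν) (x : Int) (d0 : ν)
    (f : ν → ν) (hx : x ∈ m.keys) : (m.modify x d0 f).keys = m.keys := by
  rw [PySem.Dict.keys_modify, PySem.Dict.keys_insert_of_contains _ _
    ((PySem.Dict.contains_iff_mem_keys m x).2 hx)]

theorem scorePhase (po2 : PySem.Dict Int (Option Int))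
    (m2 : PySem.Dict Int (Option Int × Option Int × Int)) (s2 : PySem.Set Int)
    (P : List Int) (a : Int) (pAo gAo : Option Int)
    (hkeys2 : m2.keys = po2.keys) (hs2 : s2 = po2.keys) (hnd2 : po2.keys.Nodup)
    (hP2 : ∀ x ∈ P, x ∈ po2.keys) (haK : a ∈ po2.keys)
    (hval2 : ∀ q v, po2.getD q none = some v → v ∈ po2.keys)
    (hm2 : ∀ k, m2.getD k (none, none, 0) = (po2.getD k none, gLink po2 k, scoreOf po2 P k))
    (hpa : po2.getD a none = pAo) (hga : gLink po2 a = gAo) :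
    InvAB s2 (applyOpt gAo 1 (applyOpt pAo 3 (m2.modify a (none, none, 0) (bump 10)))) po2
      (P ++ [a]) := by
  have hppK : ∀ pp, pAo = some pp → pp ∈ po2.keys := fun pp hpp => hval2 a pp (hpa.trans hpp)
  have hgpK : ∀ gp, gAo = some gp → gp ∈ po2.keys := by
    intro gp hgp
    rw [← hga] at hgp
    unfold gLink at hgp
    cases hv : po2.getD a none with
    | none => rw [hv] at hgp; simp [Option.bind] at hgp
    | some v =>
      rw [hv] at hgp
      simp only [Option.bind] at hgp
      exact hval2 v gp hgp
  have hkeysF : (applyOpt gAo 1 (applyOpt pAo 3 (m2.modify a (none, none, 0) (bump 10)))).keys = po2.keys := by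
    have h10 : (m2.modify a (none, none, 0) (bump 10)).keys = po2.keys := by
      rw [keys_modify_mem _ _ _ _ (hkeys2 ▸ haK)]; exact hkeys2
    cases pAo with
    | none =>
      cases gAo with
      | none => exact h10
      | some gp =>
        simp only [applyOpt]
        rw [keys_modify_mem _ _ _ _ (h10 ▸ hgpK gp rfl)]; exact h10
    | some pp =>
      have h3 : ((m2.modify a (none, none, 0) (bump 10)).modify pp (none, none, 0) (bump 3)).keys = po2.keys := by
        rw [keys_modify_mem _ _ _ _ (h10 ▸ hppK pp rfl)]; exact h10
      cases gAo with
      | none => exact h3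
      | some gp =>
        simp only [applyOpt]
        rw [keys_modify_mem _ _ _ _ (h3 ▸ hgpK gp rfl)]; exact h3
  refine ⟨hkeysF, hs2, hnd2, ?_, hval2, ?_⟩
  · intro x hx
    rcases List.mem_append.1 hx with hx | hx
    · exact hP2 x hx
    · rw [List.mem_singleton] at hx; exact hx ▸ haK
  · intro k
    rw [scoreOf_append_singleton]
    have hcontrib : contrib po2 a k
        = (if a = k then 10 else 0) + (if pAo = some k then 3 else 0)
          + (if gAo = some k then 1 else 0) := by
      unfold contrib
      rw [hpa, hga]
    cases pAo with
    | none =>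
      cases gAo with
      | none =>
        simp only [applyOpt, PySem.Dict.getD_modify, hm2, bump, hcontrib]
        split_ifs <;> (try subst_vars) <;> simp_all only [Prod.mk.injEq, Option.some.injEq, reduceCtorEq, ite_true, ite_false, not_true, not_false_iff, true_and, and_true] <;> (try subst_vars) <;> first | rfl | omega | (refine ⟨rfl, rfl, ?_⟩; omega) | (refine ⟨?_, ?_, ?_⟩ <;> first | rfl | omega)
      | some gp =>
        simp only [applyOpt, PySem.Dict.getD_modify, hm2, bump, hcontrib]
        split_ifs <;> (try subst_vars) <;> simp_all only [Prod.mk.injEq, Option.some.injEq, reduceCtorEq, ite_true, ite_false, not_true, not_false_iff, true_and, and_true] <;> (try subst_vars) <;> first | rfl | omega | (refine ⟨rfl, rfl, ?_⟩; omega) | (refine ⟨?_, ?_, ?_⟩ <;> first | rfl | omega)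
    | some pp =>
      cases gAo with
      | none =>
        simp only [applyOpt, PySem.Dict.getD_modify, hm2, bump, hcontrib]
        split_ifs <;> (try subst_vars) <;> simp_all only [Prod.mk.injEq, Option.some.injEq, reduceCtorEq, ite_true, ite_false, not_true, not_false_iff, true_and, and_true] <;> (try subst_vars) <;> first | rfl | omega | (refine ⟨rfl, rfl, ?_⟩; omega) | (refine ⟨?_, ?_, ?_⟩ <;> first | rfl | omega)
      | some gp =>
        simp only [applyOpt, PySem.Dict.getD_modify, hm2, bump, hcontrib]
        split_ifs <;> (try subst_vars) <;> simp_all only [Prod.mk.injEq, Option.some.injEq, reduceCtorEq, ite_true, ite_false, not_true, not_false_iff, true_and, and_true] <;> (try subst_vars) <;> first | rfl | omega | (refine ⟨rfl, rfl, ?_⟩; omega) | (refine ⟨?_, ?_, ?_⟩ <;> first | rfl | omega)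

theorem contains_false {ν : Type} (d : PySem.Dict Int ν) (x : Int) (hx : x ∉ d.keys) :
    d.contains x = false := by
  cases hb : d.contains x
  · rfl
  · exact absurd ((PySem.Dict.contains_iff_mem_keys d x).1 hb) hx

theorem childFresh (po1 : PySem.Dict Int (Option Int))
    (m1 : PySem.Dict Int (Option Int × Option Int × Int)) (P : List Int) (a c : Int)
    (hkeys1 : m1.keys = po1.keys) (hnd1 : po1.keys.Nodup)
    (hP1 : ∀ x ∈ P, x ∈ po1.keys) (haK1 : a ∈ po1.keys)
    (hval1 : ∀ q v, po1.getD q none = some v → v ∈ po1.keys)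
    (hm1 : ∀ k, m1.getD k (none, none, 0) = (po1.getD k none, gLink po1 k, scoreOf po1 P k))
    (hmemC : c ∉ po1.keys) :
    InvAB (po1.keys ++ [c])
      (applyOpt (gLink po1 a) 1 (applyOpt (po1.getD a none) 3
        ((m1.insert c (some a, po1.getD a none, 0)).modify a (none, none, 0) (bump 10))))
      (po1.insert c (some a)) (P ++ [a]) := by
  have hCf : po1.contains c = false := contains_false po1 c hmemC
  have hac : a ≠ c := fun he => hmemC (he ▸ haK1)
  have hkeys2 : (po1.insert c (some a)).keys = po1.keys ++ [c] :=
    PySem.Dict.keys_insert_of_not_contains po1 _ hCf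
  have hgetD2 : ∀ q, q ≠ c → (po1.insert c (some a)).getD q none = po1.getD q none := by
    intro q hq
    rw [PySem.Dict.getD_insert, if_neg hq]
  have hgetD2c : (po1.insert c (some a)).getD c none = some a := by
    rw [PySem.Dict.getD_insert, if_pos rfl]
  have hvalne : ∀ q v, po1.getD q none = some v → v ≠ c :=
    fun q v hv he => hmemC (he ▸ hval1 q v hv)
  have hcongr : ∀ x ∈ P, (po1.insert c (some a)).getD x none = po1.getD x none ∧
      ∀ v, po1.getD x none = some v → (po1.insert c (some a)).getD v none = po1.getD v none := by
    intro x hx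
    refine ⟨hgetD2 x (fun he => hmemC (he ▸ hP1 x hx)), fun v hv => hgetD2 v (hvalne x v hv)⟩
  have hglink2 : ∀ q, q ≠ c → gLink (po1.insert c (some a)) q = gLink po1 q := by
    intro q hq
    exact gLink_congr po1 _ q (hgetD2 q hq) (fun v hv => hgetD2 v (hvalne q v hv))
  refine scorePhase (po1.insert c (some a)) _ _ P a _ _ ?_ hkeys2.symm ?_ ?_ ?_ ?_ ?_ ?_ ?_
  · rw [PySem.Dict.keys_insert_of_not_contains _ _ (contains_false m1 c (by rw [hkeys1]; exact hmemC)), hkeys1, hkeys2]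
  · rw [hkeys2]
    simp only [List.nodup_append, List.nodup_singleton, true_and, and_true, List.disjoint_singleton]
    refine ⟨hnd1, ?_⟩
    intro x hx b hb
    rw [List.mem_singleton] at hb
    subst hb
    exact fun he => hmemC (he ▸ hx)
  · intro x hx
    rw [hkeys2]
    exact List.mem_append_left _ (hP1 x hx)
  · rw [hkeys2]; exact List.mem_append_left _ haK1
  · intro q v hv
    rw [hkeys2]
    by_cases hq : q = c
    · subst hq
      rw [hgetD2c] at hv
      rw [Option.some.injEq] at hv
      exact List.mem_append_left _ (hv ▸ haK1)
    · rw [hgetD2 q hq] at hv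
      exact List.mem_append_left _ (hval1 q v hv)
  · intro k
    by_cases hk : k = c
    · subst hk
      rw [PySem.Dict.getD_insert, if_pos rfl, hgetD2c]
      have hgl : gLink (po1.insert k (some a)) k = po1.getD a none := by
        unfold gLink
        rw [hgetD2c]
        simp only [Option.bind]
        exact hgetD2 a hac
      rw [hgl]
      have hsc : scoreOf (po1.insert k (some a)) P k = 0 := by
        rw [scoreOf_congr po1 _ P k hcongr]
        exact scoreOf_notin po1 P k hP1 hval1 hmemC
      rw [hsc]
    · rw [PySem.Dict.getD_insert, if_neg hk, hm1 k, hgetD2 k hk, hglink2 k hk,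
        scoreOf_congr po1 _ P k hcongr]
  · exact hgetD2 a hac
  · exact hglink2 a hac

theorem invAB_step (pr : List Int) (s : PySem.Set Int)
    (m : PySem.Dict Int (Option Int × Option Int × Int))
    (po : PySem.Dict Int (Option Int)) (cnt : PySem.Dict Int Int) (P : List Int)
    (h : InvAB s m po P) :
    InvAB (stepA (s, m) pr).1 (stepA (s, m) pr).2 (stepB1 (po, cnt) pr).1
      (P ++ [pvPairP pr]) := by
  obtain ⟨hkeys, hs, hnd, hP, hval, hm⟩ := h
  simp only [stepA, stepB1]
  generalize pvPairP pr = a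
  generalize pvPairC pr = c
  by_cases hmemA : a ∈ po.keys
  · -- parent already signed up
    have hSa : PySem.Set.contains s a = true := by
      rw [hs]; exact (PySem.Set.contains_iff po.keys a).2 hmemA
    have hDa : po.contains a = true := (PySem.Dict.contains_iff_mem_keys po a).2 hmemA
    simp only [hSa, hDa, if_true, hm a]
    by_cases hmemC : c ∈ po.keys
    · -- child already signed up: all setdefaults are no-ops
      have hDc : po.contains c = true := (PySem.Dict.contains_iff_mem_keys po c).2 hmemC
      have hMc : m.contains c = true := by
        rw [PySem.Dict.contains_iff_mem_keys, hkeys]; exact hmemC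
      rw [PySem.Dict.setdefault_of_contains _ _ hDc, PySem.Dict.setdefault_of_contains _ _ hMc,
        PySem.Set.add_of_mem (hs ▸ hmemC)]
      exact scorePhase po _ s P a (po.getD a none) (gLink po a)
        hkeys hs hnd hP hmemA hval hm rfl rfl
    · -- fresh child
      have hDc : po.contains c = false := contains_false po c hmemC
      have hMc : m.contains c = false := contains_false m c (by rw [hkeys]; exact hmemC)
      rw [PySem.Dict.setdefault_of_not_contains _ _ hDc,
        PySem.Dict.setdefault_of_not_contains _ _ hMc,
        PySem.Set.add_of_not_mem (hs ▸ hmemC), hs]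
      exact childFresh po m P a c hkeys hnd hP hmemA hval hm hmemC
  · -- fresh parent
    have hSa : PySem.Set.contains s a = false := by
      rw [hs]
      cases hb : PySem.Set.contains po.keys a
      · rfl
      · exact absurd ((PySem.Set.contains_iff po.keys a).1 hb) hmemA
    have hDa : po.contains a = false := contains_false po a hmemA
    have hMa : m.contains a = false := contains_false m a (by rw [hkeys]; exact hmemA)
    simp only [hSa, hDa, Bool.false_eq_true, if_false]
    rw [PySem.Dict.setdefault_of_not_contains _ _ hMa, hs,
      PySem.Set.add_of_not_mem (s := po.keys) (x := a) hmemA]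
    -- the state after registering the fresh parent a
    have hgetD1 : ∀ q, (po.insert a none).getD q none = po.getD q none := by
      intro q
      rw [PySem.Dict.getD_insert]
      split_ifs with hq
      · subst hq; rw [PySem.Dict.getD_of_not_contains po _ hDa]
      · rfl
    have hkeys1 : (po.insert a none).keys = po.keys ++ [a] :=
      PySem.Dict.keys_insert_of_not_contains po _ hDa
    have hnd1 : (po.insert a none).keys.Nodup := PySem.Dict.nodup_keys_insert po a none hnd
    have hval1 : ∀ q v, (po.insert a none).getD q none = some v → v ∈ (po.insert a none).keys := by
      intro q v hv
      rw [hgetD1 q] at hv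
      rw [hkeys1]
      exact List.mem_append_left _ (hval q v hv)
    have hP1 : ∀ x ∈ P, x ∈ (po.insert a none).keys := by
      intro x hx
      rw [hkeys1]
      exact List.mem_append_left _ (hP x hx)
    have haK1 : a ∈ (po.insert a none).keys := by
      rw [hkeys1]
      exact List.mem_append_right _ (List.mem_singleton_self a)
    have hcongr1 : ∀ x ∈ P, (po.insert a none).getD x none = po.getD x none ∧
        ∀ v, po.getD x none = some v → (po.insert a none).getD v none = po.getD v none := by
      intro x _
      exact ⟨hgetD1 x, fun v _ => hgetD1 v⟩
    have hglink1 : ∀ q, gLink (po.insert a none) q = gLink po q := by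
      intro q
      exact gLink_congr po _ q (hgetD1 q) (fun v _ => hgetD1 v)
    have hm1keys : (m.insert a (none, none, 0)).keys = (po.insert a none).keys := by
      rw [PySem.Dict.keys_insert_of_not_contains m _ hMa, hkeys, hkeys1]
    have hpoa : (po.insert a none).getD a none = none := by
      rw [hgetD1 a, PySem.Dict.getD_of_not_contains po _ hDa]
    have hga : gLink (po.insert a none) a = none := by
      unfold gLink
      rw [hpoa]
      rfl
    have hm1 : ∀ k, (m.insert a (none, none, 0)).getD k (none, none, 0)
        = ((po.insert a none).getD k none, gLink (po.insert a none) k,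
           scoreOf (po.insert a none) P k) := by
      intro k
      rw [PySem.Dict.getD_insert, hglink1 k, hgetD1 k, scoreOf_congr po _ P k hcongr1]
      split_ifs with hk
      · subst hk
        rw [PySem.Dict.getD_of_not_contains po _ hDa,
          scoreOf_notin po P k hP hval hmemA]
        unfold gLink
        rw [PySem.Dict.getD_of_not_contains po _ hDa]
        rfl
      · exact hm k
    by_cases hmemC : c ∈ (po.insert a none).keys
    · have hDc : (po.insert a none).contains c = true :=
        (PySem.Dict.contains_iff_mem_keys _ c).2 hmemC
      have hMc : (m.insert a (none, none, 0)).contains c = true := by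
        rw [PySem.Dict.contains_iff_mem_keys, hm1keys]; exact hmemC
      have hcK : c ∈ po.keys ++ [a] := by rw [← hkeys1]; exact hmemC
      rw [PySem.Dict.setdefault_of_contains _ _ hDc, PySem.Dict.setdefault_of_contains _ _ hMc,
        PySem.Set.add_of_mem (s := po.keys ++ [a]) (x := c) hcK]
      have hres := scorePhase (po.insert a none) _ (po.keys ++ [a]) P a none none
        hm1keys hkeys1.symm hnd1 hP1 haK1 hval1 hm1 hpoa hga
      exact hres
    · have hDc : (po.insert a none).contains c = false := contains_false _ c hmemC
      have hMc : (m.insert a (none, none, 0)).contains c = false :=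
        contains_false _ c (by rw [hm1keys]; exact hmemC)
      have hcK : c ∉ po.keys ++ [a] := by rw [← hkeys1]; exact hmemC
      rw [PySem.Dict.setdefault_of_not_contains _ _ hDc,
        PySem.Dict.setdefault_of_not_contains _ _ hMc,
        PySem.Set.add_of_not_mem (s := po.keys ++ [a]) (x := c) hcK]
      have hres := childFresh (po.insert a none) (m.insert a (none, none, 0)) P a c
        hm1keys hnd1 hP1 haK1 hval1 hm1 hmemC
      rw [hpoa, hga, hkeys1] at hres
      exact hres


theorem invAB_all (L : List (List Int)) :
    InvAB (L.foldl stepA (PySem.Set.empty, PySem.Dict.empty)).1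
      (L.foldl stepA (PySem.Set.empty, PySem.Dict.empty)).2
      (L.foldl stepB1 (PySem.Dict.empty, PySem.Dict.empty)).1
      (L.map pvPairP) := by
  induction L using List.reverseRecOn with
  | nil =>
    refine ⟨rfl, rfl, List.nodup_nil, ?_, ?_, fun k => rfl⟩
    · intro x hx; exact absurd hx (List.not_mem_nil)
    · intro q v hv
      simp [PySem.Dict.getD_empty] at hv
  | append_singleton t pr ih =>
    simp only [List.foldl_append, List.foldl_cons, List.foldl_nil, List.map_append,
      List.map_cons, List.map_nil]
    exact invAB_step pr _ _ _ _ _ ih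

theorem stepB2_keys (po : PySem.Dict Int (Option Int)) (sc : PySem.Dict Int Int)
    (pv : Int × Int) (hk : sc.keys = po.keys) (h1 : pv.1 ∈ po.keys)
    (hval : ∀ q v, po.getD q none = some v → v ∈ po.keys) :
    (stepB2 po sc pv).keys = po.keys := by
  unfold stepB2
  cases h2 : po.getD pv.1 none with
  | none => rw [keys_modify_mem _ _ _ _ (hk ▸ h1)]; exact hk
  | some par =>
    have hpk : par ∈ po.keys := hval pv.1 par h2
    have hk3 : ((sc.modify pv.1 0 (fun v => v + 10 * pv.2)).modify par 0
        (fun v => v + 3 * pv.2)).keys = po.keys := by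
      rw [keys_modify_mem _ _ _ _ (by rw [keys_modify_mem _ _ _ _ (hk ▸ h1), hk]; exact hpk),
        keys_modify_mem _ _ _ _ (hk ▸ h1)]
      exact hk
    dsimp only
    cases h3 : po.getD par none with
    | none => exact hk3
    | some gp =>
      dsimp only
      rw [keys_modify_mem _ _ _ _ (hk3 ▸ hval par gp h3)]
      exact hk3

theorem pass2_keys (po : PySem.Dict Int (Option Int))
    (hval : ∀ q v, po.getD q none = some v → v ∈ po.keys) :
    ∀ (its : List (Int × Int)) (sc : PySem.Dict Int Int),
      sc.keys = po.keys → (∀ pv ∈ its, pv.1 ∈ po.keys) →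
      (its.foldl (stepB2 po) sc).keys = po.keys := by
  intro its
  induction its with
  | nil => intro sc hk _; exact hk
  | cons pv t ih =>
    intro sc hk hmem
    simp only [List.foldl_cons]
    exact ih _ (stepB2_keys po sc pv hk (hmem pv List.mem_cons_self) hval)
      (fun x hx => hmem x (List.mem_cons_of_mem _ hx))

theorem foldB_cnt (L : List (List Int)) (po0 : PySem.Dict Int (Option Int)) (cnt0 : PySem.Dict Int Int) :
    (L.foldl stepB1 (po0, cnt0)).2
      = (L.map pvPairP).foldl (fun d x => d.insert x (d.getD x 0 + 1)) cnt0 := by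
  induction L generalizing po0 cnt0 with
  | nil => rfl
  | cons pr t ih => simp only [List.foldl_cons, List.map_cons, stepB1]; exact ih _ _

theorem sorted2_eq_sorted_toLex {α : Type} (xs : List α) (k1 k2 : α → Int) :
    PySem.List.sorted2 xs k1 k2 false
      = PySem.List.sorted xs (fun x => toLex (k1 x, k2 x)) false := by
  have hfun : (fun (a b : α) => (decide (k1 a < k1 b) || (!decide (k1 b < k1 a) && decide (k2 a < k2 b))))
      = (fun (a b : α) => decide (toLex (k1 a, k2 a) < toLex (k1 b, k2 b))) := by
    funext a b
    by_cases h1 : k1 a < k1 b <;> by_cases h2 : k1 b < k1 a <;> by_cases h3 : k2 a < k2 b <;>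
      simp [h1, h2, h3, Prod.Lex.lt_iff] <;> omega
  show xs.foldl (fun acc x => PySem.List.insertBy
      (fun (a b : α) => (decide (k1 a < k1 b) || (!decide (k1 b < k1 a) && decide (k2 a < k2 b)))) x acc) []
    = PySem.List.sorted xs (fun x => toLex (k1 x, k2 x)) false
  rw [hfun, PySem.List.sorted_eq_foldl_insertBy]

theorem stepB2_getD (po : PySem.Dict Int (Option Int)) (sc : PySem.Dict Int Int) (pk : Int × Int) (k : Int) :
    (stepB2 po sc pk).getD k 0 = sc.getD k 0 + pk.2 * contrib po pk.1 k := by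
  cases h1 : po.getD pk.1 none with
  | none =>
    simp only [stepB2, contrib, gLink, h1, Option.bind,
      PySem.Dict.getD_modify, Option.some.injEq, reduceCtorEq]
    split_ifs <;> first | omega | (exfalso; assumption) | (subst_vars; omega) | (subst_vars; ring)
  | some par =>
    cases h2 : po.getD par none with
    | none =>
      simp only [stepB2, contrib, gLink, h1, h2, Option.bind,
        PySem.Dict.getD_modify, Option.some.injEq, reduceCtorEq]
      split_ifs <;> first | omega | (exfalso; assumption) | (subst_vars; omega) | (subst_vars; ring)
    | some gp =>
      simp only [stepB2, contrib, gLink, h1, h2, Option.bind,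
        PySem.Dict.getD_modify, Option.some.injEq, reduceCtorEq]
      split_ifs <;> first | omega | (exfalso; assumption) | (subst_vars; omega) | (subst_vars; ring)

theorem pass2_getD (po : PySem.Dict Int (Option Int)) (its : List (Int × Int)) :
    ∀ (sc : PySem.Dict Int Int) (k : Int),
      (its.foldl (stepB2 po) sc).getD k 0
        = sc.getD k 0 + (its.map (fun pv => pv.2 * contrib po pv.1 k)).sum := by
  induction its with
  | nil => simp
  | cons pv t ih =>
    intro sc k
    simp only [List.foldl_cons, List.map_cons, List.sum_cons, ih, stepB2_getD]
    ring

theorem sum_ite_single (a : Int) (h : Int → Int) :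
    ∀ (S : List Int), S.Nodup → a ∈ S → (S.map (fun p => if p = a then h p else 0)).sum = h a := by
  intro S
  induction S with
  | nil => simp
  | cons x t ih =>
    intro hnd hmem
    simp only [List.nodup_cons] at hnd
    by_cases hxa : x = a
    · subst hxa
      simp only [List.map_cons, List.sum_cons, if_pos rfl]
      have hz : ∀ p ∈ t, (if p = x then h p else 0) = 0 := by
        intro p hp
        rw [if_neg]
        rintro rfl
        exact hnd.1 hp
      rw [List.map_congr_left hz]
      simp
    · have hmem' : a ∈ t := by
        rcases List.mem_cons.1 hmem with h' | h'
        · exact absurd h'.symm hxa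
        · exact h'
      simp only [List.map_cons, List.sum_cons, if_neg hxa]
      rw [ih hnd.2 hmem']
      ring

theorem sum_count_dedup (xs : List Int) (g : Int → Int) :
    ((PySem.Set.ofList xs).map (fun p => ((xs.count p : Int)) * g p)).sum = (xs.map g).sum := by
  induction xs using List.reverseRecOn with
  | nil => simp [PySem.Set.ofList_nil]
  | append_singleton t a ih =>
    rw [PySem.Set.ofList_append_singleton]
    by_cases hmem : a ∈ PySem.Set.ofList t
    · rw [PySem.Set.add_of_mem hmem]
      have hmem' : a ∈ t := by rwa [PySem.Set.mem_ofList] at hmem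
      have hpt : ∀ p ∈ PySem.Set.ofList t,
          (((t ++ [a]).count p : Int)) * g p
            = ((t.count p : Int)) * g p + (if p = a then g p else 0) := by
        intro p hp
        rw [List.count_append, List.count_singleton]
        by_cases hpa : p = a
        · subst hpa
          simp
          push_cast
          ring
        · simp [hpa]
          exact Or.inl (Ne.symm hpa)
      rw [List.map_congr_left hpt, PySem.List.sum_map_add_int,
        sum_ite_single a g _ (PySem.Set.nodup_ofList t) hmem, ih]
      simp
    · rw [PySem.Set.add_of_not_mem hmem]
      have hmem' : a ∉ t := by rwa [PySem.Set.mem_ofList] at hmem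
      have hpt : ∀ p ∈ PySem.Set.ofList t,
          (((t ++ [a]).count p : Int)) * g p = ((t.count p : Int)) * g p := by
        intro p hp
        have : p ≠ a := by rintro rfl; exact hmem hp
        rw [List.count_append, List.count_singleton, if_neg (by simpa [beq_iff_eq] using Ne.symm this)]
        simp
      rw [List.map_append, List.sum_append, List.map_congr_left hpt, ih]
      simp [List.count_append, List.count_singleton, List.count_eq_zero_of_not_mem hmem']

theorem solution_eq (L : List (List Int)) : solution L = solution_alt L := by
  obtain ⟨hkeys, hs, hnd, hP, hval, hm⟩ := invAB_all L
  unfold solution solution_alt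
  dsimp only
  generalize hpoE : (L.foldl stepB1 (PySem.Dict.empty, PySem.Dict.empty)).1 = po at *
  generalize hmE : (L.foldl stepA (PySem.Set.empty, PySem.Dict.empty)).2 = m at *
  generalize hcntE : (L.foldl stepB1 (PySem.Dict.empty, PySem.Dict.empty)).2 = cnt at *
  generalize hPE : L.map pvPairP = P at *
  have hcnt : cnt = PySem.Dict.counter P := by
    rw [← hcntE, foldB_cnt, hPE, PySem.Dict.foldl_insert_getD_add_one_eq_counter]
  have hsc0items : (po.keys.foldl (fun d k => d.insert k (0 : Int)) PySem.Dict.empty).items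
      = po.keys.map (fun k => (k, (0 : Int))) := by
    rw [PySem.Dict.items_foldl_insert_fresh po.keys (fun k => k) (fun _ => (0 : Int))
      PySem.Dict.empty (fun x _ => PySem.Dict.contains_empty x) (by simpa using hnd)]
    rw [show (PySem.Dict.empty : PySem.Dict Int Int).items = [] from rfl, List.nil_append]
  have hsc0keys : (po.keys.foldl (fun d k => d.insert k (0 : Int)) PySem.Dict.empty).keys
      = po.keys := by
    rw [PySem.Dict.keys_foldl_insert, PySem.Dict.keys_empty, PySem.Set.update_nil_left]
    exact PySem.Set.ofList_eq_self_of_nodup po.keys hnd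
  have hsc0getD : ∀ k, (po.keys.foldl (fun d k => d.insert k (0 : Int)) PySem.Dict.empty).getD k 0
      = 0 := by
    intro k
    by_cases hk : k ∈ po.keys
    · exact PySem.Dict.getD_of_mem_items _ (by rw [hsc0items]; exact List.mem_map.2 ⟨k, hk, rfl⟩)
        (by rw [hsc0keys]; exact hnd) 0
    · exact PySem.Dict.getD_of_not_contains _ _ (contains_false _ _ (by rw [hsc0keys]; exact hk))
  have hmemcnt : ∀ pv ∈ cnt.items, pv.1 ∈ po.keys := by
    intro pv hpv
    rw [hcnt, PySem.Dict.items_counter] at hpv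
    obtain ⟨q, hq, rfl⟩ := List.mem_map.1 hpv
    rw [PySem.Set.mem_ofList] at hq
    exact hP q hq
  have hsckeys : (cnt.items.foldl (stepB2 po)
      (po.keys.foldl (fun d k => d.insert k (0 : Int)) PySem.Dict.empty)).keys = po.keys :=
    pass2_keys po hval cnt.items _ hsc0keys hmemcnt
  have hscgetD : ∀ k, (cnt.items.foldl (stepB2 po)
      (po.keys.foldl (fun d k => d.insert k (0 : Int)) PySem.Dict.empty)).getD k 0
      = scoreOf po P k := by
    intro k
    rw [pass2_getD, hsc0getD, hcnt, PySem.Dict.items_counter, List.map_map]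
    have hco : ((fun pv : Int × Int => pv.2 * contrib po pv.1 k)
        ∘ (fun q => (q, ((List.count q P : Nat) : Int))))
        = fun q => ((P.count q : Int)) * contrib po q k := rfl
    rw [hco, sum_count_dedup P (fun q => contrib po q k)]
    simp [scoreOf]
  rw [sorted2_eq_sorted_toLex, sorted2_eq_sorted_toLex]
  have hkeyB : (fun x : Int => toLex (-(cnt.items.foldl (stepB2 po)
        (po.keys.foldl (fun d k => d.insert k (0 : Int)) PySem.Dict.empty)).getD x 0, x))
      = fun x : Int => toLex (-(scoreOf po P x), x) := by
    funext x; rw [hscgetD]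
  rw [hsckeys, hkeyB]
  have hmitems : m.items = po.keys.map
      (fun k => (k, (po.getD k none, gLink po k, scoreOf po P k))) := by
    rw [PySem.Dict.items_eq_map_keys m (hkeys ▸ hnd) (none, none, 0), hkeys]
    exact List.map_congr_left (fun k _ => by rw [hm k])
  rw [hmitems]
  have hRperm : (PySem.List.sorted po.keys (fun k : Int => toLex (-(scoreOf po P k), k)) false).Perm
      po.keys := PySem.List.sorted_perm _ _ _
  have hRnodup : (PySem.List.sorted po.keys (fun k : Int => toLex (-(scoreOf po P k), k)) false).Nodup :=
    (hRperm.nodup_iff).2 hnd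
  have hRle := PySem.List.sorted_pairwise po.keys (fun k : Int => toLex (-(scoreOf po P k), k))
  have hRlt : (PySem.List.sorted po.keys (fun k : Int => toLex (-(scoreOf po P k), k)) false).Pairwise
      (fun a b => (toLex (-(scoreOf po P a), a)) < (toLex (-(scoreOf po P b), b))) := by
    have hne : (PySem.List.sorted po.keys (fun k : Int => toLex (-(scoreOf po P k), k)) false).Pairwise
        (fun a b : Int => a ≠ b) := hRnodup
    refine (hRle.and hne).imp ?_
    rintro a b ⟨hle, hne⟩
    refine lt_of_le_of_ne hle (fun he => hne ?_)
    have h2 := congrArg (fun z : Lex (Int × Int) => (ofLex z).2) he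
    simpa using h2
  have hA : PySem.List.sorted
      (po.keys.map (fun k => (k, (po.getD k none, gLink po k, scoreOf po P k))))
      (fun x : Int × (Option Int × Option Int × Int) => toLex (-(x.2.2.2), x.1)) false
      = (PySem.List.sorted po.keys (fun k : Int => toLex (-(scoreOf po P k), k)) false).map
        (fun k => (k, (po.getD k none, gLink po k, scoreOf po P k))) := by
    apply PySem.List.sorted_eq_of_perm_of_pairwise_lt
    · exact hRperm.map _
    · rw [List.pairwise_map]
      exact hRlt
  rw [hA, List.map_map]
  have hid : ((fun x : Int × (Option Int × Option Int × Int) => x.1)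
      ∘ (fun k : Int => (k, (po.getD k none, gLink po k, scoreOf po P k)))) = id := rfl
  rw [hid, List.map_id]

-- ===== VERDICT (by name: the statement is the Claim_ definition above) =====
theorem solution_spec : Claim_equal_solution := by
  intro L _ _
  unfold Spec_solution
  exact solution_eq L
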